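-- pv_equiv track=rewrite | github.com/toychibayev/exem_python_1 | problem2.py | raqamlar
-- ===== SOURCE A (Python) =====
-- def raqamlar(word):
--     numbers = []
--     number = ""
--
--     for char in word:
--         if char.isdigit():
--             number += char
--         else:
--             if number:
--                 numbers.append(str(int(number)))
--                 number = ""
--
--     if number:
--         numbers.append(str(int(number)))
--
--     son = set(numbers)
--
--     return len(son)
-- ===== SOURCE B (Python) =====
-- def raqamlar(word):
--     vals = []
--     i = 0
--     n = len(word)
--     while i < n:
--         if word[i].isdigit():
--             v = 0
--             while i < n and word[i].isdigit():
--                 v = 10 * v + (ord(word[i]) - 48)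
--                 i += 1
--             vals.append(v)
--         else:
--             i += 1
--     vals.sort()
--     count = 0
--     prev = None
--     for v in vals:
--         if v != prev:
--             count += 1
--         prev = v
--     return count
-- ===== Notes on version B (the rewrite author's own statement) =====
-- stated objective: alternative
-- what changed: Replaces A's single-pass string accumulator with a set of str(int(run)) strings by nested index loops that compute each digit run's numeric value arithmetically (Horner, ord-48), then sort the values and count distinct ones with an adjacent-comparison scan instead of a hash set.
import Mathlib
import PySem

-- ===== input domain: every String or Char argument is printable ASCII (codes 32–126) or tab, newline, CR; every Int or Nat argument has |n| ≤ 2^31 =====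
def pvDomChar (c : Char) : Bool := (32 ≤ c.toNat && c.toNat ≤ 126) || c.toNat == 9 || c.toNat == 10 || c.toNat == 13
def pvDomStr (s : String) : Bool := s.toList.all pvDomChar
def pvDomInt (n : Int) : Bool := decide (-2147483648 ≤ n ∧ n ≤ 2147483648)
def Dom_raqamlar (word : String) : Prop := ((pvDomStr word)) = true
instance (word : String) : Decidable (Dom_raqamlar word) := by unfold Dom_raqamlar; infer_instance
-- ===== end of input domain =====

-- B replaces A's one-pass string-accumulator + set-of-strings by nested index loops computing each run's numeric value arithmetically, then sort and an adjacent-distinct scan: an alternative algorithm of similar cost (the sort is O(n log n), so B is not claimed faster).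


-- ===== PORT A =====
-- int(number): in A, `number` is always a nonempty run of ASCII digits, so int() is the
-- plain base-10 value; ported as the base-10 fold (exact on nonempty ASCII-digit runs).
def runVal (ds : List Char) : Int := ds.foldl (fun v c => 10 * v + ((c.toNat : Int) - 48)) 0

-- str(int(number))
def pyIntStr (ds : List Char) : String := PySem.Int.toStr (runVal ds)

-- the loop body: state = (numbers, number)
def raqamlarStep (st : List String × List Char) (c : Char) : List String × List Char :=
  if PySem.Chars.isdigit c then (st.1, st.2 ++ [c])
  else if st.2.isEmpty then st
  else (st.1 ++ [pyIntStr st.2], [])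

def raqamlar (word : String) : Int :=
  let st := word.toList.foldl raqamlarStep ([], [])
  let numbers := if st.2.isEmpty then st.1 else st.1 ++ [pyIntStr st.2]
  ((PySem.Set.ofList numbers).length : Int)

-- ===== PORT B =====
-- the inner `while i < n and word[i].isdigit()` loop: consume digits, Horner-accumulate v
def raqamlarRun (v : Int) (cs : List Char) : Int × List Char :=
  match cs with
  | [] => (v, [])
  | c :: rest =>
      if PySem.Chars.isdigit c then raqamlarRun (10 * v + ((c.toNat : Int) - 48)) rest
      else (v, c :: rest)

theorem raqamlarRun_len (v : Int) (cs : List Char) : (raqamlarRun v cs).2.length ≤ cs.length := by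
  induction cs generalizing v with
  | nil => simp [raqamlarRun]
  | cons c rest ih =>
      simp only [raqamlarRun]
      split
      · exact le_trans (ih _) (Nat.le_succ _)
      · exact le_refl _

-- the outer `while i < n` loop (the first inner iteration starts from v = 0 on the digit seen)
def raqamlarScan : List Char → List Int
  | [] => []
  | c :: rest =>
      if PySem.Chars.isdigit c then
        let p := raqamlarRun (10 * 0 + ((c.toNat : Int) - 48)) rest
        p.1 :: raqamlarScan p.2
      else raqamlarScan rest
termination_by cs => cs.length
decreasing_by
  · exact Nat.lt_succ_of_le (raqamlarRun_len _ _)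
  · simp

def raqamlar_alt (word : String) : Int :=
  let vals := PySem.List.sorted (raqamlarScan word.toList) (fun x => x) false
  (vals.foldl (fun st v => (if st.2 ≠ some v then st.1 + 1 else st.1, some v))
      ((0 : Int), (none : Option Int))).1

-- ===== PRECONDITION & SPEC =====
def Spec_raqamlar (word : String) (out : Int) : Prop := out = raqamlar_alt word
instance (word : String) (out : Int) : Decidable (Spec_raqamlar word out) := by unfold Spec_raqamlar; infer_instance

-- ===== CLAIM (what is proved, stated in full; the proofs are below) =====
def Claim_equal_raqamlar : Prop := ∀ (word : String), Dom_raqamlar word → Spec_raqamlar word (raqamlar word)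

-- ===== LEMMAS AND PROOFS =====

-- the common characterisation: values of the maximal digit runs, `numb` = pending run
def pvRuns (numb : List Char) : List Char → List Int
  | [] => if numb.isEmpty then [] else [runVal numb]
  | c :: cs =>
      if PySem.Chars.isdigit c then pvRuns (numb ++ [c]) cs
      else (if numb.isEmpty then [] else [runVal numb]) ++ pvRuns [] cs

theorem runVal_append (ds : List Char) (c : Char) :
    runVal (ds ++ [c]) = 10 * runVal ds + ((c.toNat : Int) - 48) := by
  simp [runVal, List.foldl_append]

-- A's fold produces exactly the run values, rendered with str()
theorem pvA_inv (cs : List Char) (nums : List String) (numb : List Char) :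
    (let st := cs.foldl raqamlarStep (nums, numb)
     if st.2.isEmpty then st.1 else st.1 ++ [pyIntStr st.2])
    = nums ++ (pvRuns numb cs).map PySem.Int.toStr := by
  induction cs generalizing nums numb with
  | nil =>
      simp only [List.foldl_nil, pvRuns]
      by_cases h : numb.isEmpty <;> simp [h, pyIntStr]
  | cons c rest ih =>
      simp only [List.foldl_cons, raqamlarStep, pvRuns]
      by_cases hd : PySem.Chars.isdigit c
      · simpa [hd] using ih nums (numb ++ [c])
      · simp only [hd, Bool.false_eq_true, if_false]
        by_cases he : numb.isEmpty
        · have hn : numb = [] := by simpa using he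
          subst hn
          simpa using ih nums []
        · have he' : numb.isEmpty = false := by simpa using he
          simp only [he', Bool.false_eq_true, if_false]
          rw [ih (nums ++ [pyIntStr numb]) []]
          simp [pyIntStr]

-- B's nested loops produce exactly the run values
theorem pvB_inv (cs : List Char) :
    (∀ numb : List Char, numb ≠ [] →
      pvRuns numb cs
        = (raqamlarRun (runVal numb) cs).1 :: raqamlarScan (raqamlarRun (runVal numb) cs).2)
    ∧ pvRuns [] cs = raqamlarScan cs := by
  induction cs with
  | nil =>
      constructor
      · intro numb hn
        have : numb.isEmpty = false := by simpa using hn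
        simp [pvRuns, raqamlarRun, raqamlarScan, this]
      · simp [pvRuns, raqamlarScan]
  | cons c rest ih =>
      have hrun : ∀ numb : List Char, numb ≠ [] → PySem.Chars.isdigit c = true →
          raqamlarRun (runVal numb) (c :: rest)
            = raqamlarRun (runVal (numb ++ [c])) rest := by
        intro numb _ hd
        simp [raqamlarRun, hd, runVal_append]
      constructor
      · intro numb hn
        have he : numb.isEmpty = false := by simpa using hn
        by_cases hd : PySem.Chars.isdigit c
        · simp only [pvRuns, hd, if_true, hrun numb hn hd]
          exact ih.1 (numb ++ [c]) (by simp)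
        · have hd' : PySem.Chars.isdigit c = false := by simpa using hd
          simp only [pvRuns, hd', Bool.false_eq_true, if_false, he, raqamlarRun,
            List.singleton_append]
          rw [ih.2]
          conv_rhs => rw [raqamlarScan]
          simp [hd']
      · by_cases hd : PySem.Chars.isdigit c
        · conv_rhs => rw [raqamlarScan]
          simp only [pvRuns, hd, if_true, List.nil_append]
          have h1 : runVal [c] = 10 * 0 + ((c.toNat : Int) - 48) := by simp [runVal]
          rw [← h1]
          exact ih.1 [c] (by simp)
        · have hd' : PySem.Chars.isdigit c = false := by simpa using hd
          conv_rhs => rw [raqamlarScan]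
          simp only [pvRuns, hd', Bool.false_eq_true, if_false, List.isEmpty_nil, if_true,
            List.nil_append]
          exact ih.2

-- |set(xs)| is the Finset card
theorem pvOfList_len {α : Type} [DecidableEq α] (l : List α) :
    (PySem.Set.ofList l).length = l.toFinset.card := by
  rw [← List.toFinset_card_of_nodup (PySem.Set.nodup_ofList l)]
  congr 1
  ext x
  simp [PySem.Set.mem_ofList]

theorem pvToFinset_perm {α : Type} [DecidableEq α] {l₁ l₂ : List α} (h : l₁.Perm l₂) :
    l₁.toFinset = l₂.toFinset := by
  ext x; simp [h.mem_iff]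

-- str() on ints is injective (via the decimal-digits characterisation of Nat.toDigits)
theorem pvDigitChar_inj : ∀ a < 10, ∀ b < 10, Nat.digitChar a = Nat.digitChar b → a = b := by decide

theorem pvDigitChar_ne_dash : ∀ a < 10, Nat.digitChar a ≠ '-' := by decide

theorem pvMapDigitChar_inj : ∀ (l1 l2 : List Nat), (∀ x ∈ l1, x < 10) → (∀ x ∈ l2, x < 10) →
    l1.map Nat.digitChar = l2.map Nat.digitChar → l1 = l2 := by
  intro l1
  induction l1 with
  | nil => intro l2 _ _ h; cases l2 <;> simp_all
  | cons a t ih =>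
      intro l2 h1 h2 h
      cases l2 with
      | nil => simp_all
      | cons b t2 =>
          simp only [List.map_cons, List.cons.injEq] at h
          have ha := h1 a (by simp)
          have hb := h2 b (by simp)
          rw [pvDigitChar_inj a ha b hb h.1]
          rw [ih t2 (fun x hx => h1 x (by simp [hx])) (fun x hx => h2 x (by simp [hx])) h.2]

theorem pvToDigitsCore_eq (f : Nat) : ∀ n : Nat, 0 < n → n < f → ∀ acc : List Char,
    Nat.toDigitsCore 10 f n acc = ((Nat.digits 10 n).map Nat.digitChar).reverse ++ acc := by
  induction f with
  | zero => intro n h1 h2; omega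
  | succ f ih =>
      intro n h1 h2 acc
      rw [Nat.toDigitsCore]
      have hdig : Nat.digits 10 n = n % 10 :: Nat.digits 10 (n / 10) := Nat.digits_def' (by norm_num) h1
      by_cases h0 : n / 10 = 0
      · simp [h0, hdig]
      · simp only [h0, if_false]
        rw [ih (n / 10) (Nat.pos_of_ne_zero h0) (by omega) _]
        simp [hdig]

theorem pvToDigits_eq (n : Nat) (h : 0 < n) :
    Nat.toDigits 10 n = ((Nat.digits 10 n).map Nat.digitChar).reverse := by
  simpa using pvToDigitsCore_eq (n + 1) n h (Nat.lt_succ_self n) []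

theorem pvToDigits_inj (a b : Nat) (h : Nat.toDigits 10 a = Nat.toDigits 10 b) : a = b := by
  rcases Nat.eq_zero_or_pos a with ha | ha <;> rcases Nat.eq_zero_or_pos b with hb | hb
  · omega
  · subst ha
    rw [pvToDigits_eq b hb] at h
    have h0 : Nat.toDigits 10 0 = ['0'] := by decide
    rw [h0] at h
    have : Nat.digits 10 b = [0] := by
      have := congrArg List.reverse h
      simp at this
      exact pvMapDigitChar_inj _ _ (fun x hx => Nat.digits_lt_base (by norm_num) hx) (by simp)
        (by simpa using this.symm)
    have hb' := Nat.ofDigits_digits 10 b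
    rw [this] at hb'
    simp [Nat.ofDigits] at hb'
    omega
  · subst hb
    rw [pvToDigits_eq a ha] at h
    have h0 : Nat.toDigits 10 0 = ['0'] := by decide
    rw [h0] at h
    have : Nat.digits 10 a = [0] := by
      have := congrArg List.reverse h
      simp at this
      exact pvMapDigitChar_inj _ _ (fun x hx => Nat.digits_lt_base (by norm_num) hx) (by simp)
        (by simpa using this)
    have ha' := Nat.ofDigits_digits 10 a
    rw [this] at ha'
    simp [Nat.ofDigits] at ha'
    omega
  · rw [pvToDigits_eq a ha, pvToDigits_eq b hb] at h
    have h2 := List.reverse_injective h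
    have h3 := pvMapDigitChar_inj _ _ (fun x hx => Nat.digits_lt_base (by norm_num) hx)
      (fun x hx => Nat.digits_lt_base (by norm_num) hx) h2
    have := Nat.ofDigits_digits 10 a
    rw [h3, Nat.ofDigits_digits] at this
    omega

theorem pvToDigits_no_dash (n : Nat) : '-' ∉ Nat.toDigits 10 n := by
  rcases Nat.eq_zero_or_pos n with h | h
  · subst h; decide
  · rw [pvToDigits_eq n h]
    intro hmem
    rw [List.mem_reverse] at hmem
    obtain ⟨d, hd, hc⟩ := List.mem_map.mp hmem
    exact pvDigitChar_ne_dash d (Nat.digits_lt_base (by norm_num) hd) hc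

theorem pvToStr_inj : Function.Injective PySem.Int.toStr := by
  intro m n h
  have h' : PySem.Int.toChars m = PySem.Int.toChars n := by
    rw [← PySem.Int.toList_toStr, ← PySem.Int.toList_toStr, h]
  unfold PySem.Int.toChars at h'
  by_cases hm : m < 0 <;> by_cases hn : n < 0
  · simp only [hm, hn, if_true, List.cons.injEq] at h'
    have := pvToDigits_inj _ _ h'.2
    omega
  · simp only [hm, hn, if_true, if_false] at h'
    exact absurd (h' ▸ List.mem_cons_self) (pvToDigits_no_dash n.toNat)
  · simp only [hm, hn, if_true, if_false] at h'
    exact absurd (h'.symm ▸ List.mem_cons_self) (pvToDigits_no_dash m.toNat)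
  · simp only [hm, hn, if_false] at h'
    have := pvToDigits_inj _ _ h'
    omega

theorem pvMapToFinset_card (l : List Int) :
    ((l.map PySem.Int.toStr).toFinset).card = l.toFinset.card := by
  have h : (l.map PySem.Int.toStr).toFinset = l.toFinset.image PySem.Int.toStr := by
    ext x; simp
  rw [h, Finset.card_image_of_injective _ pvToStr_inj]

-- B's final scan over a sorted list counts the distinct elements
theorem pvCount_some (s : List Int) (hs : s.Pairwise (· ≤ ·)) (a : Int)
    (ha : ∀ x ∈ s, a ≤ x) (c : Int) :
    (s.foldl (fun st v => (if st.2 ≠ some v then st.1 + 1 else st.1, some v)) (c, some a)).1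
      = c + ((s.toFinset.erase a).card : Int) := by
  induction s generalizing a c with
  | nil => simp
  | cons v rest ih =>
      have hp : rest.Pairwise (· ≤ ·) := hs.of_cons
      have hv : ∀ x ∈ rest, v ≤ x := fun x hx => (List.pairwise_cons.mp hs).1 x hx
      by_cases hva : v = a
      · subst hva
        simp only [List.foldl_cons, ne_eq, not_true_eq_false, if_false, List.toFinset_cons,
          Finset.erase_insert_eq_erase]
        exact ih hp v hv c
      · simp only [List.foldl_cons, ne_eq]
        rw [if_pos (by simpa using fun h : a = v => hva h.symm)]
        rw [ih hp v hv (c + 1)]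
        have hav : a < v := lt_of_le_of_ne (ha v (List.mem_cons_self)) (fun h => hva h.symm)
        have hanotin : a ∉ (v :: rest).toFinset := by
          simp only [List.toFinset_cons, Finset.mem_insert, List.mem_toFinset]
          rintro (h | h)
          · exact absurd h.symm hva
          · exact absurd (hv a h) (not_le.mpr hav)
        rw [Finset.erase_eq_of_notMem hanotin]
        have hcard : (v :: rest).toFinset.card = (rest.toFinset.erase v).card + 1 := by
          rw [List.toFinset_cons]
          have h2 : insert v rest.toFinset = insert v (rest.toFinset.erase v) := by
            ext x; by_cases hx : x = v <;> simp [hx]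
          rw [h2, Finset.card_insert_of_notMem (Finset.notMem_erase v _)]
        rw [hcard]
        push_cast
        ring

theorem pvCount_none (s : List Int) (hs : s.Pairwise (· ≤ ·)) (c : Int) :
    (s.foldl (fun st v => (if st.2 ≠ some v then st.1 + 1 else st.1, some v)) (c, (none : Option Int))).1
      = c + (s.toFinset.card : Int) := by
  cases s with
  | nil => simp
  | cons v rest =>
      have hp : rest.Pairwise (· ≤ ·) := hs.of_cons
      have hv : ∀ x ∈ rest, v ≤ x := fun x hx => (List.pairwise_cons.mp hs).1 x hx
      simp only [List.foldl_cons, ne_eq, reduceCtorEq, not_false_eq_true, if_true]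
      rw [pvCount_some rest hp v hv (c + 1)]
      have hcard : (v :: rest).toFinset.card = (rest.toFinset.erase v).card + 1 := by
        rw [List.toFinset_cons]
        have h2 : insert v rest.toFinset = insert v (rest.toFinset.erase v) := by
          ext x; by_cases hx : x = v <;> simp [hx]
        rw [h2, Finset.card_insert_of_notMem (Finset.notMem_erase v _)]
      rw [hcard]
      push_cast
      ring

-- ===== VERDICT (by name: the statement is the Claim_ definition above) =====
theorem raqamlar_spec : Claim_equal_raqamlar := by
  intro word _
  unfold Spec_raqamlar raqamlar raqamlar_alt
  dsimp only
  have hA := pvA_inv word.toList [] []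
  simp only [List.nil_append] at hA
  rw [hA, (pvB_inv word.toList).2]
  set vals := raqamlarScan word.toList with hvals
  rw [pvCount_none _ (PySem.List.sorted_pairwise vals (fun x => x)), zero_add]
  rw [pvOfList_len, pvMapToFinset_card,
    pvToFinset_perm (PySem.List.sorted_perm vals (fun x => x) false)]
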